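-- pv_equiv track=rewrite | github.com/JseMatamoros/DACOM | datastory/views.py | clasificar_respuestas
-- ===== SOURCE A (Python) =====
-- def contar_palabras_comunes(respuesta1, respuesta2):
--     palabras_respuesta1 = set(respuesta1.lower().split())
--     palabras_respuesta2 = set(respuesta2.lower().split())
--     return len(palabras_respuesta1.intersection(palabras_respuesta2))
--
-- def clasificar_respuestas(respuestas):
--     clasificacion = {}
--     for i, respuesta1 in enumerate(respuestas):
--         conteo_palabras_comunes = 0
--         for j, respuesta2 in enumerate(respuestas):
--             if i != j:
--                 conteo_palabras_comunes += contar_palabras_comunes(respuesta1, respuesta2)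
--         clasificacion[respuesta1] = conteo_palabras_comunes
--     return sorted(clasificacion.items(), key=lambda x: x[1], reverse=True)
-- ===== SOURCE B (Python) =====
-- def clasificar_respuestas(respuestas):
--     sets = [set(r.lower().split()) for r in respuestas]
--     df = {}
--     for s in sets:
--         for w in s:
--             df[w] = df.get(w, 0) + 1
--     clasificacion = {}
--     for r, s in zip(respuestas, sets):
--         total = 0
--         for w in s:
--             total += df.get(w, 0) - 1
--         clasificacion[r] = total
--     return sorted(clasificacion.items(), key=lambda x: x[1], reverse=True)
-- ===== Notes on version B (the rewrite author's own statement) =====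
-- stated objective: faster
-- what changed: Replaced the O(n^2) all-pairs set-intersection double loop by a single document-frequency pass: each response's score is the sum of (df[w]-1) over its distinct words, computed in one pass over all words.
import Mathlib
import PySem

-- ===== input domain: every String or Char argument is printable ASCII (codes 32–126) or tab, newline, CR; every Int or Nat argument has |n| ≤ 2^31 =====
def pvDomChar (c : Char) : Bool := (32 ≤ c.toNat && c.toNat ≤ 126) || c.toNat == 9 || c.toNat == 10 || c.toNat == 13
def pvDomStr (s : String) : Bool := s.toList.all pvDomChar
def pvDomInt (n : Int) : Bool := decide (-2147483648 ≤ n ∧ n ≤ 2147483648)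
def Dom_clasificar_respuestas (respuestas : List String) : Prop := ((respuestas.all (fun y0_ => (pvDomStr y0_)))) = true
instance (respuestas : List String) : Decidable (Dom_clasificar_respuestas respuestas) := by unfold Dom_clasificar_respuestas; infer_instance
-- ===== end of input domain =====

-- B replaces A's O(n^2) all-pairs set-intersection loop by one document-frequency pass (score = Σ over the response's distinct words of df[w]-1); measurably faster.


-- ===== PORT A =====
def contar_palabras_comunes (respuesta1 respuesta2 : String) : Int :=
  let palabras_respuesta1 := PySem.Set.ofList (PySem.Str.split₀ (PySem.Str.lower respuesta1))
  let palabras_respuesta2 := PySem.Set.ofList (PySem.Str.split₀ (PySem.Str.lower respuesta2))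
  PySem.Set.len (PySem.Set.inter palabras_respuesta1 palabras_respuesta2)

def clasificar_respuestas (respuestas : List String) : List (String × Int) :=
  let clasificacion : PySem.Dict String Int :=
    (PySem.List.enumerate respuestas).foldl (fun d p =>
      let conteo_palabras_comunes :=
        (PySem.List.enumerate respuestas).foldl (fun c q =>
          if p.1 ≠ q.1 then c + contar_palabras_comunes p.2 q.2 else c) (0 : Int)
      d.insert p.2 conteo_palabras_comunes) PySem.Dict.empty
  PySem.List.sorted clasificacion.items (fun x => x.2) true

-- ===== PORT B =====
def clasificar_respuestas_alt (respuestas : List String) : List (String × Int) :=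
  let sets := respuestas.map (fun r => PySem.Set.ofList (PySem.Str.split₀ (PySem.Str.lower r)))
  let df : PySem.Dict String Int :=
    sets.foldl (fun d s => s.foldl (fun d w => d.insert w (d.getD w 0 + 1)) d) PySem.Dict.empty
  let clasificacion : PySem.Dict String Int :=
    (respuestas.zip sets).foldl (fun d p =>
      let total := p.2.foldl (fun t w => t + (df.getD w 0 - 1)) (0 : Int)
      d.insert p.1 total) PySem.Dict.empty
  PySem.List.sorted clasificacion.items (fun x => x.2) true

-- ===== PRECONDITION & SPEC =====
def Spec_clasificar_respuestas (respuestas : List String) (out : List (String × Int)) : Prop := out = clasificar_respuestas_alt respuestas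
instance (respuestas : List String) (out : List (String × Int)) : Decidable (Spec_clasificar_respuestas respuestas out) := by unfold Spec_clasificar_respuestas; infer_instance

-- ===== CLAIM (what is proved, stated in full; the proofs are below) =====
def Claim_equal_clasificar_respuestas : Prop := ∀ (respuestas : List String), Dom_clasificar_respuestas respuestas → Spec_clasificar_respuestas respuestas (clasificar_respuestas respuestas)

-- ===== LEMMAS AND PROOFS =====

-- the distinct lowercase words of a response
def pvW (r : String) : List String := PySem.Set.ofList (PySem.Str.split₀ (PySem.Str.lower r))

lemma pvW_nodup (r : String) : (pvW r).Nodup := PySem.Set.nodup_ofList _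

lemma sum_map_add (s : List String) (f g : String → Int) :
    (s.map (fun w => f w + g w)).sum = (s.map f).sum + (s.map g).sum := by
  induction s with
  | nil => simp
  | cons x xs ih => simp [ih]; ring

lemma sum_map_neg_one (s : List String) :
    (s.map (fun _ => (-1 : Int))).sum = -(s.length : Int) := by
  induction s with
  | nil => simp
  | cons x xs ih => simp

lemma sum_map_exchange (s : List String) (L : List (List String)) (f : String → List String → Int) :
    (s.map (fun w => (L.map (fun t => f w t)).sum)).sum
      = (L.map (fun t => (s.map (fun w => f w t)).sum)).sum := by
  induction L with
  | nil => simp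
  | cons t L ih => rw [List.map_cons, List.sum_cons, ← ih, ← sum_map_add]; simp

lemma count_nodup_ite (t : List String) (ht : t.Nodup) (w : String) :
    (t.count w : Int) = if w ∈ t then 1 else 0 := by
  by_cases h : w ∈ t
  · simp [h, List.count_eq_one_of_mem ht h]
  · simp [h, List.count_eq_zero_of_not_mem h]

lemma sum_ite_eq_filter_length (s t : List String) :
    (s.map (fun w => if w ∈ t then (1 : Int) else 0)).sum
      = ((s.filter (fun w => t.contains w)).length : Int) := by
  induction s with
  | nil => simp
  | cons x xs ih =>
    by_cases h : x ∈ t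
    · simp [h, ih]; ring
    · simp [h, ih]

lemma contar_eq (r1 r2 : String) :
    contar_palabras_comunes r1 r2
      = (((pvW r1).filter (fun w => (pvW r2).contains w)).length : Int) := by
  simp only [contar_palabras_comunes, PySem.Set.len, PySem.Set.inter, PySem.Set.contains, pvW]

lemma contar_self (r : String) : contar_palabras_comunes r r = ((pvW r).length : Int) := by
  have h : (pvW r).filter (fun w => (pvW r).contains w) = pvW r := by
    rw [List.filter_eq_self]
    intro w hw
    simpa using hw
  rw [contar_eq, h]

lemma map_comp_snd_enumerate (f : String → Int) (xs : List String) (s : Int) :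
    List.map (fun q : Int × String => f q.2) (PySem.List.enumerate xs s) = List.map f xs := by
  induction xs generalizing s with
  | nil => simp
  | cons x xs ih => simp [PySem.List.enumerate_cons, ih]

lemma foldl_enumerate_snd {β : Type} (xs : List String) (s : Int) (g : β → String → β) (init : β) :
    (PySem.List.enumerate xs s).foldl (fun d p => g d p.2) init = xs.foldl g init := by
  induction xs generalizing s init with
  | nil => simp
  | cons x xs ih => simp [PySem.List.enumerate_cons, ih]

-- A's inner loop: skipping exactly index i subtracts the i-th term from the row total
lemma skip_gen (xs : List String) (f : String → Int) :
    ∀ (i : Nat) (s a : Int), (h : i < xs.length) →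
    (PySem.List.enumerate xs s).foldl
        (fun c q => if s + (i : Int) ≠ q.1 then c + f q.2 else c) a
      = a + (xs.map f).sum - f xs[i] := by
  induction xs with
  | nil => intro i s a h; simp at h
  | cons x xs ih =>
    intro i s a h
    rw [PySem.List.enumerate_cons]
    cases i with
    | zero =>
      simp only [List.foldl_cons, Nat.cast_zero, add_zero]
      rw [if_neg (by simp)]
      rw [PySem.List.foldl_congr_mem _ _ (fun c q => c + f q.2)]
      · rw [PySem.List.foldl_add, map_comp_snd_enumerate]
        simp
        ring
      · intro acc q hq
        rw [PySem.List.mem_enumerate_iff] at hq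
        obtain ⟨k, hk, rfl⟩ := hq
        have hne : s ≠ s + 1 + (k : Int) := by omega
        simp [hne]
    | succ k =>
      simp only [List.foldl_cons]
      have hne : s + ((k + 1 : Nat) : Int) ≠ s := by push_cast; omega
      rw [if_pos hne]
      have hcast : ∀ c : Int, ∀ q : Int × String,
          (if s + ((k + 1 : Nat) : Int) ≠ q.1 then c + f q.2 else c)
            = (if (s + 1) + (k : Int) ≠ q.1 then c + f q.2 else c) := by
        intro c q
        have : s + ((k + 1 : Nat) : Int) = (s + 1) + (k : Int) := by push_cast; ring
        rw [this]
      rw [PySem.List.foldl_congr_mem _ _ (fun c q => if (s + 1) + (k : Int) ≠ q.1 then c + f q.2 else c) _ (fun acc q _ => hcast acc q)]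
      rw [ih k (s + 1) (a + f x) (by simpa using h)]
      simp
      ring

-- document frequency: B's nested fold is the counter of the flattened word lists
lemma df_eq_counter (sets : List (List String)) :
    sets.foldl (fun d s => s.foldl (fun d w => d.insert w (d.getD w 0 + 1)) d) PySem.Dict.empty
      = PySem.Dict.counter sets.flatten := by
  rw [← PySem.Dict.foldl_insert_getD_add_one_eq_counter, List.foldl_flatten]

-- each inner sum over a response's word set counts the shared distinct words
lemma pv_inner_sum (r t' : String) :
    ((pvW r).map (fun w => ((pvW t').count w : Int))).sum = contar_palabras_comunes r t' := by
  have h : ∀ w ∈ pvW r, ((pvW t').count w : Int) = if w ∈ pvW t' then (1 : Int) else 0 :=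
    fun w _ => count_nodup_ite _ (pvW_nodup t') w
  rw [List.map_congr_left h, sum_ite_eq_filter_length, ← contar_eq]

-- row total: the sum of shared-word counts over all responses, as a df sum
set_option maxHeartbeats 1000000 in
lemma row_total_eq (xs : List String) (r : String) :
    (xs.map (fun t => contar_palabras_comunes r t)).sum
      = ((pvW r).map (fun w => (((xs.map pvW).flatten.count w : Int)))).sum := by
  have h1 : ∀ w, ((xs.map pvW).map (fun t => (t.count w : Int))).sum
      = (((xs.map pvW).flatten.count w : Int)) := by
    intro w
    rw [List.count_flatten]
    push_cast
    simp [List.map_map]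
    rfl
  calc (xs.map (fun t => contar_palabras_comunes r t)).sum
      = ((xs.map pvW).map (fun t => ((pvW r).map (fun w => (t.count w : Int))).sum)).sum := by
        rw [List.map_map]
        exact congrArg List.sum (List.map_congr_left (fun t _ => (pv_inner_sum r t).symm))
    _ = ((pvW r).map (fun w => ((xs.map pvW).map (fun t => (t.count w : Int))).sum)).sum := by
        rw [sum_map_exchange]
    _ = ((pvW r).map (fun w => (((xs.map pvW).flatten.count w : Int)))).sum := by
        exact congrArg List.sum (List.map_congr_left (fun w _ => h1 w))

-- the pointwise row value: A's skip-one sum equals B's df-based sum, for every string r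
set_option maxHeartbeats 1000000 in
lemma row_eq (xs : List String) (r : String) :
    (xs.map (fun t => contar_palabras_comunes r t)).sum - contar_palabras_comunes r r
      = ((pvW r).map (fun w =>
          (((xs.map pvW).flatten.count w : Int)) - 1)).sum := by
  have hsplit : ((pvW r).map (fun w => (((xs.map pvW).flatten.count w : Int)) - 1)).sum
      = ((pvW r).map (fun w => (((xs.map pvW).flatten.count w : Int)))).sum
          - ((pvW r).length : Int) := by
    rw [show (fun w => (((xs.map pvW).flatten.count w : Int)) - 1)
          = (fun w => (((xs.map pvW).flatten.count w : Int)) + (-1)) from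
        funext (fun w => by ring)]
    rw [sum_map_add, sum_map_neg_one]
    ring
  rw [hsplit, contar_self, row_total_eq]

-- A's dict, re-expressed as a single fold over the list of responses
set_option maxHeartbeats 1000000 in
lemma dictA_eq (xs : List String) :
    (PySem.List.enumerate xs).foldl (fun d p =>
        d.insert p.2 ((PySem.List.enumerate xs).foldl (fun c q =>
          if p.1 ≠ q.1 then c + contar_palabras_comunes p.2 q.2 else c) (0 : Int)))
      PySem.Dict.empty
    = xs.foldl (fun d r => d.insert r
        ((xs.map (fun t => contar_palabras_comunes r t)).sum - contar_palabras_comunes r r))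
      PySem.Dict.empty := by
  rw [PySem.List.foldl_congr_mem _ _ (fun d p => d.insert p.2
      ((xs.map (fun t => contar_palabras_comunes p.2 t)).sum - contar_palabras_comunes p.2 p.2))]
  · exact foldl_enumerate_snd xs 0 (fun d r => d.insert r
      ((xs.map (fun t => contar_palabras_comunes r t)).sum - contar_palabras_comunes r r))
      PySem.Dict.empty
  · intro d p hp
    rw [PySem.List.mem_enumerate_iff] at hp
    obtain ⟨k, hk, rfl⟩ := hp
    simp only
    congr 1
    have hs := skip_gen xs (fun t => contar_palabras_comunes xs[k] t) k 0 0 hk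
    simpa using hs

-- B's dict, re-expressed the same way
set_option maxHeartbeats 1000000 in
lemma dictB_eq (xs : List String) :
    (xs.zip (xs.map pvW)).foldl (fun d p =>
        d.insert p.1 (p.2.foldl (fun t w =>
          t + ((PySem.Dict.counter (xs.map pvW).flatten).getD w 0 - 1)) (0 : Int)))
      PySem.Dict.empty
    = xs.foldl (fun d r => d.insert r
        ((xs.map (fun t => contar_palabras_comunes r t)).sum - contar_palabras_comunes r r))
      PySem.Dict.empty := by
  have hz : ∀ (l : List String), l.zip (l.map pvW) = l.map (fun r => (r, pvW r)) := by
    intro l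
    induction l with
    | nil => rfl
    | cons x t ih => simp [ih]
  rw [hz, List.foldl_map]
  apply PySem.List.foldl_congr_mem
  intro d r _
  simp only
  congr 1
  rw [PySem.List.foldl_add]
  simp only [PySem.Dict.getD_counter]
  rw [zero_add, ← row_eq]

-- ===== VERDICT (by name: the statement is the Claim_ definition above) =====
set_option maxHeartbeats 1000000 in
theorem clasificar_respuestas_spec : Claim_equal_clasificar_respuestas := by
  intro xs _
  unfold Spec_clasificar_respuestas
  show clasificar_respuestas xs = clasificar_respuestas_alt xs
  simp only [clasificar_respuestas, clasificar_respuestas_alt]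
  rw [show (fun r => PySem.Set.ofList (PySem.Str.split₀ (PySem.Str.lower r))) = pvW from rfl]
  rw [df_eq_counter, dictA_eq, dictB_eq]
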